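-- pv_equiv track=rewrite | github.com/TheTimelessPuppeteer/chi-saho-wei-2026-python | weeks/week-07/solutions/1114405013/hand_10093.py | build_row_states
-- ===== SOURCE A (Python) =====
-- def build_row_states(cols):
--     states = []
--     for state in range(1 << cols):
--         if state & (state << 1):
--             continue
--         if state & (state << 2):
--             continue
--         states.append(state)
--     return states
-- ===== SOURCE B (Python) =====
-- def build_row_states(cols):
--     # DP generation: g[n] holds the valid masks for n columns, in increasing
--     # order: the masks for n-1 columns, then bit n-1 combined with every valid
--     # mask of the low n-3 columns.
--     g = [[0]]
--     for n in range(1, cols + 1):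
--         lower = g[n - 3] if n >= 3 else [0]
--         g.append(g[n - 1] + [(1 << (n - 1)) + m for m in lower])
--     return g[cols]
-- ===== Notes on version B (the rewrite author's own statement) =====
-- stated objective: faster
-- what changed: B replaces A's brute-force scan-and-filter over all 2^cols bitmasks by a recursive generation that constructs exactly the valid masks (masks for n columns = masks for n-1 columns, then bit n-1 combined with masks of the low n-3 columns), preserving increasing order.
import Mathlib
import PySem

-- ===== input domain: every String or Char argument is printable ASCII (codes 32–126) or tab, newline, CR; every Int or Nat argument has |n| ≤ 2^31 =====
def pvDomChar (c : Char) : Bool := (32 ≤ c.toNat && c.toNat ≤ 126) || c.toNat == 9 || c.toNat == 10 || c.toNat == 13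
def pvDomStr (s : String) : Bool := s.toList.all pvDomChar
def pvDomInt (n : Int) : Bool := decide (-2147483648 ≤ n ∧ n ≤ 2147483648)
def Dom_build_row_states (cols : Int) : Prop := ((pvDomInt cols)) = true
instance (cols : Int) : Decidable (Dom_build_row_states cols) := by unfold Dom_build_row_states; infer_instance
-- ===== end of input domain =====

-- B replaces A's brute-force scan over all 2^cols masks by a recursive generation
-- that builds exactly the valid masks, in the same increasing order (objective: faster).

-- ===== PORT A =====
-- range(1 << cols) ported via cols.toNat: exact for cols ≥ 0 (Pre_); Python raises ValueError for cols < 0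
def build_row_states (cols : Int) : List Int :=
  (List.range (1 <<< cols.toNat)).foldl
    (fun states state =>
      if state &&& (state <<< 1) ≠ 0 then states
      else if state &&& (state <<< 2) ≠ 0 then states
      else states ++ [(state : Int)])
    []

-- ===== PORT B =====
-- g[n-1] / g[n-3] inside the loop are always in range, ported with getD (default never
-- taken); the final g[cols] is in range for cols ≥ -1 (Pre_ gives cols ≥ 0)
def build_row_states_alt (cols : Int) : List Int :=
  ((List.range cols.toNat).foldl (fun g (i : Nat) =>
      let n := i + 1
      let lower := if 3 ≤ n then g.getD (n - 3) [] else [0]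
      g ++ [g.getD (n - 1) [] ++ lower.map (fun m => ((1 : Int) <<< (n - 1)) + m)])
    [[0]]).getD cols.toNat []

-- ===== PRECONDITION & SPEC =====
-- Pre_ excludes cols < 0, where Python A raises ValueError (negative shift count).
def Pre_build_row_states (cols : Int) : Prop := 0 ≤ cols
instance (cols : Int) : Decidable (Pre_build_row_states cols) := by unfold Pre_build_row_states; infer_instance
def pvWitness_build_row_states : Int := 3

def Spec_build_row_states (cols : Int) (out : List Int) : Prop := out = build_row_states_alt cols
instance (cols : Int) (out : List Int) : Decidable (Spec_build_row_states cols out) := by unfold Spec_build_row_states; infer_instance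

-- ===== CLAIM (what is proved, stated in full; the proofs are below) =====
def Claim_equal_build_row_states : Prop := ∀ (cols : Int), Dom_build_row_states cols → Pre_build_row_states cols → Spec_build_row_states cols (build_row_states cols)
-- ===== LEMMAS AND PROOFS =====

-- the filter A's loop implements
def pvValid (s : Nat) : Bool := (s &&& (s <<< 1) == 0) && (s &&& (s <<< 2) == 0)

-- the list A computes, over Nat
def pvFA (n : Nat) : List Nat := (List.range (2 ^ n)).filter pvValid

theorem pv_and_eq_zero (a b : ℕ) : a &&& b = 0 ↔ ∀ i, ¬(a.testBit i ∧ b.testBit i) := by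
  constructor
  · intro h i ⟨ha, hb⟩
    have := congrArg (Nat.testBit · i) h
    simp [Nat.testBit_and, ha, hb] at this
  · intro h
    apply Nat.eq_of_testBit_eq
    intro i
    simp only [Nat.testBit_and, Nat.zero_testBit]
    have := h i
    cases ha : a.testBit i <;> cases hb : b.testBit i <;> simp_all

theorem pv_valid_iff (s : Nat) :
    pvValid s = true ↔ ∀ j, ¬(s.testBit j ∧ s.testBit (j+1)) ∧ ¬(s.testBit j ∧ s.testBit (j+2)) := by
  have hs : ∀ k i, (s <<< k).testBit i = (decide (i ≥ k) && s.testBit (i - k)) :=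
    fun k i => Nat.testBit_shiftLeft s
  unfold pvValid
  rw [Bool.and_eq_true, beq_iff_eq, beq_iff_eq, pv_and_eq_zero, pv_and_eq_zero]
  constructor
  · rintro ⟨h1, h2⟩ j
    refine ⟨fun ⟨hj, hj1⟩ => ?_, fun ⟨hj, hj2⟩ => ?_⟩
    · exact h1 (j+1) ⟨hj1, by simp [hs]; exact hj⟩
    · exact h2 (j+2) ⟨hj2, by simp [hs]; exact hj⟩
  · intro h
    refine ⟨fun i ⟨hi, hsh⟩ => ?_, fun i ⟨hi, hsh⟩ => ?_⟩
    · rw [hs] at hsh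
      rcases Bool.and_eq_true _ _ |>.mp hsh with ⟨hge, hbit⟩
      have hge' : 1 ≤ i := by simpa using of_decide_eq_true hge
      exact (h (i-1)).1 ⟨hbit, by rwa [Nat.sub_add_cancel hge']⟩
    · rw [hs] at hsh
      rcases Bool.and_eq_true _ _ |>.mp hsh with ⟨hge, hbit⟩
      have hge' : 2 ≤ i := by simpa using of_decide_eq_true hge
      exact (h (i-2)).2 ⟨hbit, by rwa [Nat.sub_add_cancel hge']⟩

theorem pv_testBit_add {n m : Nat} (hm : m < 2 ^ n) (j : Nat) :
    (2 ^ n + m).testBit j = (decide (j = n) || m.testBit j) := by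
  rcases lt_trichotomy j n with h | h | h
  · rw [Nat.testBit_two_pow_add_gt h]
    have : decide (j = n) = false := by simp; omega
    rw [this, Bool.false_or]
  · subst h
    rw [Nat.testBit_two_pow_add_eq, Nat.testBit_lt_two_pow hm]
    simp
  · have h1 : 2 ^ n + m < 2 ^ j := by
      calc 2 ^ n + m < 2 ^ n + 2 ^ n := by omega
        _ = 2 ^ (n+1) := by ring
        _ ≤ 2 ^ j := Nat.pow_le_pow_right (by norm_num) h
    rw [Nat.testBit_lt_two_pow h1, Nat.testBit_lt_two_pow (lt_of_lt_of_le hm (Nat.pow_le_pow_right (by norm_num) h.le))]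
    have : decide (j = n) = false := by simp; omega
    rw [this, Bool.or_false]

theorem pv_key {n m : Nat} (hm : m < 2 ^ n) :
    pvValid (2 ^ n + m) = (decide (m < 2 ^ (n - 2)) && pvValid m) := by
  have hmf : ∀ j, n ≤ j → m.testBit j = false :=
    fun j hj => Nat.testBit_lt_two_pow (lt_of_lt_of_le hm (Nat.pow_le_pow_right (by norm_num) hj))
  by_cases hlow : m < 2 ^ (n - 2)
  · have hmf2 : ∀ j, n - 2 ≤ j → m.testBit j = false :=
      fun j hj => Nat.testBit_lt_two_pow (lt_of_lt_of_le hlow (Nat.pow_le_pow_right (by norm_num) hj))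
    simp only [hlow, decide_true, Bool.true_and]
    by_cases hv : pvValid m = true
    · rw [hv]
      rw [pv_valid_iff] at hv ⊢
      intro j
      constructor
      · rintro ⟨h1, h2⟩
        rw [pv_testBit_add hm] at h1 h2
        rcases Bool.or_eq_true _ _ |>.mp h1 with e1 | b1
        · have : j = n := of_decide_eq_true e1
          subst this
          rcases Bool.or_eq_true _ _ |>.mp h2 with e2 | b2
          · exact absurd (of_decide_eq_true e2) (by omega)
          · exact absurd b2 (by simp [hmf (j+1) (by omega)])
        · rcases Bool.or_eq_true _ _ |>.mp h2 with e2 | b2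
          · have : j + 1 = n := of_decide_eq_true e2
            exact absurd b1 (by simp [hmf2 j (by omega)])
          · exact (hv j).1 ⟨b1, b2⟩
      · rintro ⟨h1, h2⟩
        rw [pv_testBit_add hm] at h1 h2
        rcases Bool.or_eq_true _ _ |>.mp h1 with e1 | b1
        · have : j = n := of_decide_eq_true e1
          subst this
          rcases Bool.or_eq_true _ _ |>.mp h2 with e2 | b2
          · exact absurd (of_decide_eq_true e2) (by omega)
          · exact absurd b2 (by simp [hmf (j+2) (by omega)])
        · rcases Bool.or_eq_true _ _ |>.mp h2 with e2 | b2
          · have : j + 2 = n := of_decide_eq_true e2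
            exact absurd b1 (by simp [hmf2 j (by omega)])
          · exact (hv j).2 ⟨b1, b2⟩
    · have hv' : pvValid m = false := by simpa using hv
      rw [hv']
      rw [Bool.not_eq_true, ← Bool.not_eq_true] at hv
      apply Bool.eq_false_iff.mpr
      intro hvs
      apply hv
      rw [pv_valid_iff] at hvs ⊢
      intro j
      have hsj := hvs j
      rw [pv_testBit_add hm j, pv_testBit_add hm (j+1), pv_testBit_add hm (j+2)] at hsj
      constructor
      · rintro ⟨b1, b2⟩
        exact hsj.1 ⟨by simp [b1], by simp [b2]⟩
      · rintro ⟨b1, b2⟩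
        exact hsj.2 ⟨by simp [b1], by simp [b2]⟩
  · -- m has a bit at n-1 or n-2 : the sum is invalid
    simp only [hlow, decide_false, Bool.false_and]
    apply Bool.eq_false_iff.mpr
    intro hvs
    rw [pv_valid_iff] at hvs
    -- find a high bit of m
    have hex : ∃ j, n - 2 ≤ j ∧ j < n ∧ m.testBit j = true := by
      by_contra hno
      push_neg at hno
      apply hlow
      exact Nat.lt_pow_two_of_testBit m fun j hj => by
        by_cases hjn : j < n
        · simpa using hno j hj hjn
        · exact hmf j (by omega)
    rcases hex with ⟨j, hj1, hj2, hj3⟩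
    have hbj : (2 ^ n + m).testBit j = true := by rw [pv_testBit_add hm]; simp [hj3]
    have hbn : (2 ^ n + m).testBit n = true := by rw [pv_testBit_add hm]; simp
    rcases (by omega : n = j + 1 ∨ n = j + 2) with h | h
    · subst h; exact (hvs j).1 ⟨hbj, hbn⟩
    · subst h; exact (hvs j).2 ⟨hbj, hbn⟩

-- A's loop is the filter by pvValid
theorem pv_foldl_shape (l : List Nat) (acc : List Int) :
    l.foldl (fun states state =>
      if state &&& (state <<< 1) ≠ 0 then states
      else if state &&& (state <<< 2) ≠ 0 then states
      else states ++ [(state : Int)]) acc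
    = acc ++ (l.filter pvValid).map Int.ofNat := by
  induction l generalizing acc with
  | nil => simp
  | cons x xs ih =>
    rw [List.foldl_cons, List.filter_cons]
    by_cases h1 : x &&& (x <<< 1) = 0
    · by_cases h2 : x &&& (x <<< 2) = 0
      · have hv : pvValid x = true := by simp [pvValid, h1, h2]
        rw [if_neg (fun hc => hc h1), if_neg (fun hc => hc h2), ih, hv]
        simp [Int.ofNat_eq_natCast]
      · have hv : pvValid x = false := by simp [pvValid, h2]
        rw [if_neg (fun hc => hc h1), if_pos h2, ih, hv]
        simp
    · have hv : pvValid x = false := by simp [pvValid, h1]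
      rw [if_pos h1, ih, hv]
      simp

theorem pv_FA_zero : pvFA 0 = [0] := by decide

theorem pv_filter_range_lt (p : Nat → Bool) {k N : Nat} (h : k ≤ N) :
    (List.range N).filter (fun m => decide (m < k) && p m) = (List.range k).filter p := by
  rw [← Nat.add_sub_cancel' h, List.range_add, List.filter_append]
  have h1 : (List.range k).filter (fun m => decide (m < k) && p m) = (List.range k).filter p :=
    List.filter_congr (fun m hm => by simp [List.mem_range.mp hm])
  have h2 : ((List.range (N - k)).map (fun x => k + x)).filter
      (fun m => decide (m < k) && p m) = [] := by
    rw [List.filter_eq_nil_iff]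
    intro a ha
    rcases List.mem_map.mp ha with ⟨x, _, rfl⟩
    simp
  rw [h1, h2, List.append_nil]

theorem pv_FA_succ (n : Nat) :
    pvFA (n+1) = pvFA n ++ (pvFA (n-2)).map (fun m => 2 ^ n + m) := by
  unfold pvFA
  rw [pow_succ, mul_two, List.range_add, List.filter_append]
  congr 1
  rw [List.filter_map]
  have hc : (List.range (2 ^ n)).filter (pvValid ∘ (fun x => 2 ^ n + x))
      = (List.range (2 ^ n)).filter (fun m => decide (m < 2 ^ (n - 2)) && pvValid m) :=
    List.filter_congr (fun m hm => pv_key (List.mem_range.mp hm))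
  rw [hc, pv_filter_range_lt pvValid (Nat.pow_le_pow_right (by norm_num) (by omega))]

-- B's table entries, as Int lists
def pvGN (n : Nat) : List Int := (pvFA n).map Int.ofNat

theorem pv_GN_zero : pvGN 0 = [0] := by
  rw [pvGN, pv_FA_zero]; rfl

theorem pv_GN_succ (k : Nat) :
    pvGN (k+1) = pvGN k ++ (pvGN (k-2)).map (fun m => ((1 : Int) <<< k) + m) := by
  unfold pvGN
  rw [pv_FA_succ k, List.map_append]
  congr 1
  rw [List.map_map, List.map_map]
  apply List.map_congr_left
  intro m _
  simp only [Function.comp_apply, Int.ofNat_eq_natCast, Int.shiftLeft_eq]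
  push_cast; ring

theorem pv_getD_map_range {α : Type} (f : Nat → α) (d : α) {j N : Nat} (hj : j < N) :
    ((List.range N).map f).getD j d = f j := by
  rw [List.getD_eq_getElem?_getD, List.getElem?_map, List.getElem?_range hj]
  rfl

theorem pv_fold_inv (k : Nat) :
    (List.range k).foldl (fun g (i : Nat) =>
        let n := i + 1
        let lower := if 3 ≤ n then g.getD (n - 3) [] else [0]
        g ++ [g.getD (n - 1) [] ++ lower.map (fun m => ((1 : Int) <<< (n - 1)) + m)])
      [[0]]
    = (List.range (k+1)).map pvGN := by
  induction k with
  | zero =>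
    rw [List.range_zero, List.foldl_nil, List.range_one, List.map_cons, List.map_nil, pv_GN_zero]
  | succ k ih =>
    rw [List.range_succ, List.foldl_append, ih, List.foldl_cons, List.foldl_nil]
    simp only [Nat.add_sub_cancel]
    have hlow : (if 3 ≤ k + 1 then ((List.range (k+1)).map pvGN).getD (k + 1 - 3) [] else [0])
        = pvGN (k - 2) := by
      by_cases h3 : 3 ≤ k + 1
      · rw [if_pos h3, pv_getD_map_range pvGN [] (by omega), (by omega : k + 1 - 3 = k - 2)]
      · rw [if_neg h3, (by omega : k - 2 = 0), pv_GN_zero]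
    rw [hlow, pv_getD_map_range pvGN [] (by omega)]
    rw [List.range_succ (n := k+1), List.map_append, List.map_cons, List.map_nil, pv_GN_succ k]

theorem pv_alt_eq (n : Nat) : build_row_states_alt (n : Int) = pvGN n := by
  unfold build_row_states_alt
  rw [Int.toNat_natCast, pv_fold_inv, pv_getD_map_range pvGN [] (by omega)]

-- ===== VERDICT (by name: the statement is the Claim_ definition above) =====
theorem build_row_states_spec : Claim_equal_build_row_states := by
  intro cols _ hpre
  unfold Pre_build_row_states at hpre
  unfold Spec_build_row_states build_row_states
  obtain ⟨n, rfl⟩ : ∃ n : Nat, cols = (n : Int) := ⟨cols.toNat, (Int.toNat_of_nonneg hpre).symm⟩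
  rw [Int.toNat_natCast, pv_foldl_shape, pv_alt_eq, Nat.one_shiftLeft, List.nil_append]
  rfl
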